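-- pv_equiv track=rewrite | github.com/MrGuineaBird/BPP-UPDATER | testb++.py | _split_plus
-- ===== SOURCE A (Python) =====
-- def _split_plus(expr):
--     parts = []
--     cur = []
--     stack = []
--     i = 0
--     in_quotes = False
--     while i < len(expr):
--         ch = expr[i]
--         if ch == '"':
--             cur.append(ch)
--             # handle escaping
--             j = i - 1
--             backslashes = 0
--             while j >= 0 and expr[j] == '\\':
--                 backslashes += 1
--                 j -= 1
--             if backslashes % 2 == 0:
--                 in_quotes = not in_quotes
--             i += 1
--             continue
--         if in_quotes:
--             cur.append(ch)
--             i += 1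
--             continue
--         if ch in "([{":
--             stack.append(ch)
--             cur.append(ch)
--             i += 1
--             continue
--         if ch in ")]}":
--             if stack:
--                 opener = stack[-1]
--                 if (opener == '(' and ch == ')') or (opener == '[' and ch == ']') or (opener == '{' and ch == '}'):
--                     stack.pop()
--             cur.append(ch)
--             i += 1
--             continue
--         if ch == '+' and not stack and not in_quotes:
--             parts.append(''.join(cur).strip())
--             cur = []
--             i += 1
--             continue
--         cur.append(ch)
--         i += 1
--     parts.append(''.join(cur).strip())
--     return parts
-- ===== SOURCE B (Python) =====
-- # B: staged passes — pass 1 scans once to collect the absolute indices of the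
-- # top-level '+' separators (incremental backslash-run count, no rescans, no
-- # character accumulator); pass 2 slices the original string between those
-- # indices and strips each slice.
-- def _split_plus(expr):
--     pairs = {')': '(', ']': '[', '}': '{'}
--     cuts = []
--     stack = []
--     in_quotes = False
--     bs = 0
--     for i, ch in enumerate(expr):
--         if ch == '"':
--             if bs % 2 == 0:
--                 in_quotes = not in_quotes
--         elif not in_quotes:
--             if ch in '([{':
--                 stack.append(ch)
--             elif ch in pairs:
--                 if stack and stack[-1] == pairs[ch]:
--                     stack.pop()
--             elif ch == '+' and not stack:
--                 cuts.append(i)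
--         bs = bs + 1 if ch == '\\' else 0
--     starts = [0] + [c + 1 for c in cuts]
--     ends = cuts + [len(expr)]
--     return [expr[a:b].strip() for a, b in zip(starts, ends)]
-- ===== Notes on version B (the rewrite author's own statement) =====
-- stated objective: faster
-- what changed: B is a staged-pass algorithm: instead of accumulating output characters while scanning (with a backward backslash rescan at every quote), it first scans once to record only the indices of top-level '+' separators (maintaining the backslash-run length incrementally), then produces the parts by slicing the original string between consecutive indices and stripping each slice.
import Mathlib
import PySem

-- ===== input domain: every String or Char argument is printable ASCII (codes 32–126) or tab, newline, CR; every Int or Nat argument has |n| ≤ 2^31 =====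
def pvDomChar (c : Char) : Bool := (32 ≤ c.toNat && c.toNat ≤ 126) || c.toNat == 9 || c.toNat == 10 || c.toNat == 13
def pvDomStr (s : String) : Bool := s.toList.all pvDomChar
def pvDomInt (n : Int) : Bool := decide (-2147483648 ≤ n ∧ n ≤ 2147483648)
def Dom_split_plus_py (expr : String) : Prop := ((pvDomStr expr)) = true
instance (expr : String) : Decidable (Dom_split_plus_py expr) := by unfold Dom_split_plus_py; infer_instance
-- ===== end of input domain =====

-- B is a staged-pass re-implementation: pass 1 records the indices of top-level '+'
-- separators (no character accumulation, backslash run tracked incrementally);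
-- pass 2 slices the string between those indices and strips each slice (objective: faster).

-- ===== PORT A =====
-- A's backward scan at expr[i]: count of consecutive '\' just before i,
-- i.e. leading '\' of the reversed processed prefix.
def bsBack : List Char → Nat
  | [] => 0
  | c :: t => if c = '\\' then bsBack t + 1 else 0

-- Python list used as a stack (append/[-1]/pop at the end) is kept top-first.
def loopA : List Char → List Char → List String → List Char → List Char → Bool → List String
  | _, [], parts, cur, _, _ => parts ++ [String.ofList (PySem.Chars.strip cur)]
  | rev, ch :: rest, parts, cur, stack, inq =>
    if ch = '"' then
      loopA (ch :: rev) rest parts (cur ++ [ch]) stack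
        (if bsBack rev % 2 = 0 then !inq else inq)
    else if inq then
      loopA (ch :: rev) rest parts (cur ++ [ch]) stack inq
    else if ch = '(' ∨ ch = '[' ∨ ch = '{' then
      loopA (ch :: rev) rest parts (cur ++ [ch]) (ch :: stack) inq
    else if ch = ')' ∨ ch = ']' ∨ ch = '}' then
      let stack' :=
        match stack with
        | [] => stack
        | op :: t =>
          if (op = '(' ∧ ch = ')') ∨ (op = '[' ∧ ch = ']') ∨ (op = '{' ∧ ch = '}') then t
          else stack
      loopA (ch :: rev) rest parts (cur ++ [ch]) stack' inq
    else if ch = '+' ∧ stack = [] ∧ inq = false then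
      loopA (ch :: rev) rest (parts ++ [String.ofList (PySem.Chars.strip cur)]) [] stack inq
    else
      loopA (ch :: rev) rest parts (cur ++ [ch]) stack inq

def split_plus_py (expr : String) : List String :=
  loopA [] expr.toList [] [] [] false

-- ===== PORT B =====
-- pairs[ch] of Source B: the opener matching a closing bracket.
def pairOf (c : Char) : Char :=
  if c = ')' then '(' else if c = ']' then '[' else '{'

-- pass-1 step of Source B; state: (cuts, stack of openers, in_quotes, bs)
def stepB (st : List Int × List Char × Bool × Nat) (p : Int × Char) :
    List Int × List Char × Bool × Nat :=
  let (cuts, stack, inq, bs) := st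
  let (i, ch) := p
  let bs' := if ch = '\\' then bs + 1 else 0
  if ch = '"' then
    (cuts, stack, (if bs % 2 = 0 then !inq else inq), bs')
  else if inq then
    (cuts, stack, inq, bs')
  else if ch = '(' ∨ ch = '[' ∨ ch = '{' then
    (cuts, ch :: stack, inq, bs')
  else if ch = ')' ∨ ch = ']' ∨ ch = '}' then
    (cuts,
      (match stack with
       | [] => stack
       | top :: t => if top = pairOf ch then t else stack), inq, bs')
  else if ch = '+' ∧ stack = [] then
    (cuts ++ [i], stack, inq, bs')
  else
    (cuts, stack, inq, bs')

def split_plus_py_alt (expr : String) : List String :=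
  let st := (PySem.List.enumerate expr.toList 0).foldl stepB ([], [], false, 0)
  let cuts := st.1
  let starts : List Int := 0 :: cuts.map (· + 1)
  let ends : List Int := cuts ++ [(expr.toList.length : Int)]
  (starts.zip ends).map (fun p =>
    String.ofList (PySem.Chars.strip (PySem.List.slice expr.toList (some p.1) (some p.2))))

-- ===== PRECONDITION & SPEC =====
def Spec_split_plus_py (expr : String) (out : List String) : Prop := out = split_plus_py_alt expr
instance (expr : String) (out : List String) : Decidable (Spec_split_plus_py expr out) := by unfold Spec_split_plus_py; infer_instance

-- ===== CLAIM (what is proved, stated in full; the proofs are below) =====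
def Claim_equal_split_plus_py : Prop := ∀ (expr : String), Dom_split_plus_py expr → Spec_split_plus_py expr (split_plus_py expr)

-- ===== LEMMAS AND PROOFS =====

-- the parts A builds, reconstructed from the cut indices B records
def assemble : List Char → List Char → Int → List Int → List String
  | cur, l, _, [] => [String.ofList (PySem.Chars.strip (cur ++ l))]
  | cur, l, s, c :: cs =>
      String.ofList (PySem.Chars.strip (cur ++ l.take (c - s).toNat)) ::
      assemble [] (l.drop ((c - s).toNat + 1)) (c + 1) cs

theorem opener_match (op ch : Char) (h : ch = ')' ∨ ch = ']' ∨ ch = '}') :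
    (op = pairOf ch) ↔
      ((op = '(' ∧ ch = ')') ∨ (op = '[' ∧ ch = ']') ∨ (op = '{' ∧ ch = '}')) := by
  rcases h with h | h | h <;> subst h <;> simp [pairOf]

theorem stepB_cuts (c0 : List Int) (st : List Char × Bool × Nat) (p : Int × Char) :
    stepB (c0, st) p = (c0 ++ (stepB ([], st) p).1, (stepB ([], st) p).2) := by
  obtain ⟨stack, inq, bs⟩ := st
  obtain ⟨i, ch⟩ := p
  simp only [stepB]
  split_ifs <;> simp

theorem cuts_acc (ps : List (Int × Char)) (c0 : List Int) (st : List Char × Bool × Nat) :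
    ps.foldl stepB (c0, st) = (c0 ++ (ps.foldl stepB ([], st)).1, (ps.foldl stepB ([], st)).2) := by
  induction ps generalizing c0 st with
  | nil => simp
  | cons p ps ih =>
    simp only [List.foldl_cons]
    rw [stepB_cuts c0 st p]
    rw [ih (c0 ++ (stepB ([], st) p).1) (stepB ([], st) p).2]
    rw [show (stepB ([], st) p) = ((stepB ([], st) p).1, (stepB ([], st) p).2) from rfl,
        ih (stepB ([], st) p).1 (stepB ([], st) p).2]
    simp

theorem stepB_first (st : List Char × Bool × Nat) (p : Int × Char) :
    (stepB ([], st) p).1 = [] ∨ (stepB ([], st) p).1 = [p.1] := by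
  obtain ⟨stack, inq, bs⟩ := st
  obtain ⟨i, ch⟩ := p
  simp only [stepB]
  split_ifs <;> simp

theorem cuts_bounds (l : List Char) (s : Int) (st : List Char × Bool × Nat) :
    (∀ c ∈ ((PySem.List.enumerate l s).foldl stepB ([], st)).1, s ≤ c ∧ c < s + l.length) ∧
      ((PySem.List.enumerate l s).foldl stepB ([], st)).1.Pairwise (· < ·) := by
  induction l generalizing s st with
  | nil => simp [PySem.List.enumerate_nil]
  | cons ch l ih =>
    rw [PySem.List.enumerate_cons, List.foldl_cons]
    rw [show (stepB ([], st) (s, ch)) = ((stepB ([], st) (s, ch)).1, (stepB ([], st) (s, ch)).2) from rfl]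
    rw [cuts_acc]
    obtain ⟨ihb, ihp⟩ := ih (s + 1) (stepB ([], st) (s, ch)).2
    rcases stepB_first st (s, ch) with h1 | h1 <;> rw [h1]
    · refine ⟨fun c hc => ?_, by simpa using ihp⟩
      have := ihb c (by simpa using hc)
      constructor <;> [omega; (simp only [List.length_cons]; push_cast; omega)]
    · simp only [List.singleton_append, List.pairwise_cons, List.mem_cons]
      refine ⟨fun c hc => ?_, fun c hc => ?_, ihp⟩
      · rcases hc with hc | hc
        · subst hc; simp only [List.length_cons]; push_cast; omega
        · have := ihb c hc; constructor <;> [omega; (simp only [List.length_cons]; push_cast; omega)]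
      · have := ihb c hc; omega

theorem assemble_shift (ch : Char) (l : List Char) (s : Int) (cuts : List Int) (cur : List Char)
    (h : ∀ c ∈ cuts, s + 1 ≤ c) :
    assemble cur (ch :: l) s cuts = assemble (cur ++ [ch]) l (s + 1) cuts := by
  cases cuts with
  | nil => simp [assemble]
  | cons c cs =>
    have hc : s + 1 ≤ c := h c (by simp)
    have ht : (c - s).toNat = (c - (s + 1)).toNat + 1 := by omega
    simp only [assemble, ht, List.take_succ_cons, List.drop_succ_cons]
    rw [List.append_cons]

-- common tail of every non-separator case of the main induction
theorem step_case (ch : Char) (l : List Char) (s : Int) (stack : List Char) (inq : Bool)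
    (rev : List Char) (parts : List String) (cur : List Char)
    (stack' : List Char) (inq' : Bool)
    (hstep : stepB ([], stack, inq, bsBack rev) (s, ch)
      = ([], stack', inq', bsBack (ch :: rev)))
    (hA : loopA rev (ch :: l) parts cur stack inq
      = loopA (ch :: rev) l parts (cur ++ [ch]) stack' inq')
    (ih : loopA (ch :: rev) l parts (cur ++ [ch]) stack' inq'
      = parts ++ assemble (cur ++ [ch]) l (s + 1)
          (((PySem.List.enumerate l (s + 1)).foldl stepB
            ([], stack', inq', bsBack (ch :: rev))).1)) :
    loopA rev (ch :: l) parts cur stack inq =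
      parts ++ assemble cur (ch :: l) s
        (((PySem.List.enumerate (ch :: l) s).foldl stepB ([], stack, inq, bsBack rev)).1) := by
  rw [PySem.List.enumerate_cons, List.foldl_cons, hstep, hA, ih]
  congr 1
  exact (assemble_shift ch l s _ (cur)
    (fun c hc => ((cuts_bounds l (s + 1) (stack', inq', bsBack (ch :: rev))).1 c hc).1)).symm

theorem loopA_assemble (l : List Char) (s : Int) (stack : List Char) (inq : Bool)
    (rev : List Char) (parts : List String) (cur : List Char) :
    loopA rev l parts cur stack inq =
      parts ++ assemble cur l s
        (((PySem.List.enumerate l s).foldl stepB ([], stack, inq, bsBack rev)).1) := by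
  induction l generalizing s stack inq rev parts cur with
  | nil => simp [loopA, PySem.List.enumerate_nil, assemble]
  | cons ch l ih =>
    by_cases hq : ch = '"'
    · subst hq
      refine step_case '"' l s stack inq rev parts cur stack
        (if bsBack rev % 2 = 0 then !inq else inq) (by simp [stepB, bsBack]) (by simp [loopA]) ?_
      exact ih (s + 1) _ _ _ _ _
    · by_cases hiq : inq = true
      · refine step_case ch l s stack inq rev parts cur stack inq
          (by simp [stepB, hq, hiq, bsBack]) (by simp [loopA, hq, hiq]) ?_
        exact ih (s + 1) _ _ _ _ _
      · by_cases hop : ch = '(' ∨ ch = '[' ∨ ch = '{'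
        · refine step_case ch l s stack inq rev parts cur (ch :: stack) inq
            (by rcases hop with h | h | h <;> subst h <;> simp [stepB, bsBack, hiq])
            (by simp [loopA, hq, hiq, hop]) ?_
          exact ih (s + 1) _ _ _ _ _
        · by_cases hcl : ch = ')' ∨ ch = ']' ∨ ch = '}'
          · have hne : ch ≠ '\\' := by rcases hcl with h | h | h <;> subst h <;> decide
            cases stack with
            | nil =>
              refine step_case ch l s [] inq rev parts cur [] inq
                (by simp [stepB, hq, hiq, hop, hcl, hne, bsBack]) ?_ ?_
              · simp only [loopA, if_neg hq, if_neg hiq, if_neg hop, if_pos hcl]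
              · exact ih (s + 1) _ _ _ _ _
            | cons op t =>
              by_cases hm : (op = '(' ∧ ch = ')') ∨ (op = '[' ∧ ch = ']') ∨ (op = '{' ∧ ch = '}')
              · have hpair : op = pairOf ch := (opener_match op ch hcl).2 hm
                refine step_case ch l s (op :: t) inq rev parts cur t inq
                  (by simp [stepB, hq, hiq, hop, hcl, hne, bsBack, hpair]) ?_ ?_
                · simp only [loopA, if_neg hq, if_neg hiq, if_neg hop, if_pos hcl, if_pos hm]
                · exact ih (s + 1) _ _ _ _ _
              · have hpair : ¬ op = pairOf ch := fun hc => hm ((opener_match op ch hcl).1 hc)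
                refine step_case ch l s (op :: t) inq rev parts cur (op :: t) inq
                  (by simp [stepB, hq, hiq, hop, hcl, hne, bsBack, hpair]) ?_ ?_
                · simp only [loopA, if_neg hq, if_neg hiq, if_neg hop, if_pos hcl, if_neg hm]
                · exact ih (s + 1) _ _ _ _ _
          · by_cases hp : ch = '+' ∧ stack = []
            · obtain ⟨h1, h2⟩ := hp
              subst h1; subst h2
              have hinqf : inq = false := Bool.eq_false_iff.2 hiq
              subst hinqf
              rw [PySem.List.enumerate_cons, List.foldl_cons]
              rw [show stepB ([], ([] : List Char), false, bsBack rev) (s, '+')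
                    = ([s], [], false, bsBack ('+' :: rev)) from by simp [stepB, bsBack]]
              rw [cuts_acc (PySem.List.enumerate l (s + 1)) [s] ([], false, bsBack ('+' :: rev))]
              simp only [loopA, if_neg hq, if_neg hiq, if_neg hop, if_neg hcl]
              rw [if_pos ⟨trivial, trivial, trivial⟩]
              rw [ih (s + 1) [] false ('+' :: rev) (parts ++ [String.ofList (PySem.Chars.strip cur)]) []]
              simp [assemble]
            · have hpnA : ¬ (ch = '+' ∧ stack = [] ∧ inq = false) := fun ⟨a, b, _⟩ => hp ⟨a, b⟩
              refine step_case ch l s stack inq rev parts cur stack inq ?_ ?_ ?_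
              · simp only [stepB, if_neg hq, if_neg hiq, if_neg hop, if_neg hcl, if_neg hp]
                simp [bsBack]
              · simp only [loopA, if_neg hq, if_neg hiq, if_neg hop, if_neg hcl, if_neg hpnA]
              · exact ih (s + 1) _ _ _ _ _

theorem assemble_zip (cuts : List Int) (s : Int) (L : List Char) (hs : 0 ≤ s)
    (hb : ∀ c ∈ cuts, s ≤ c ∧ c < L.length) (hp : cuts.Pairwise (· < ·)) :
    assemble [] (L.drop s.toNat) s cuts =
      ((s :: cuts.map (· + 1)).zip (cuts ++ [(L.length : Int)])).map
        (fun p => String.ofList (PySem.Chars.strip (PySem.List.slice L (some p.1) (some p.2)))) := by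
  induction cuts generalizing s with
  | nil =>
    simp only [assemble, List.map_nil, List.nil_append, List.zip_cons_cons, List.zip_nil_left,
      List.map_cons, List.map_nil, List.nil_append]
    rw [PySem.List.slice_toNat L hs (by positivity)]
    rw [show ((L.length : Int)).toNat = L.length from by omega]
    rw [List.take_of_length_le (by simp)]
  | cons c cs ih =>
    obtain ⟨hc1, hc2⟩ := hb c (by simp)
    simp only [List.map_cons, List.cons_append, List.zip_cons_cons, List.map_cons]
    simp only [assemble, List.nil_append]
    congr 1
    · rw [PySem.List.slice_toNat L hs (le_trans hs hc1)]
      rw [show ((c : Int) - s).toNat = c.toNat - s.toNat from by omega]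
    · have hdd : (L.drop s.toNat).drop ((c - s).toNat + 1) = L.drop (c + 1).toNat := by
        rw [List.drop_drop]
        congr 1
        omega
      rw [hdd]
      exact ih (c + 1) (by omega)
        (fun c' hc' => ⟨by have := (List.pairwise_cons.1 hp).1 c' hc'; omega,
          (hb c' (by simp [hc'])).2⟩)
        (List.pairwise_cons.1 hp).2

-- ===== VERDICT (by name: the statement is the Claim_ definition above) =====
theorem split_plus_py_spec : Claim_equal_split_plus_py := by
  intro expr _
  unfold Spec_split_plus_py split_plus_py
  have hrhs : split_plus_py_alt expr =
      ((0 :: (((PySem.List.enumerate expr.toList 0).foldl stepB ([], [], false, 0)).1).map (· + 1)).zip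
        ((((PySem.List.enumerate expr.toList 0).foldl stepB ([], [], false, 0)).1) ++ [(expr.toList.length : Int)])).map
        (fun p => String.ofList (PySem.Chars.strip (PySem.List.slice expr.toList (some p.1) (some p.2)))) := rfl
  rw [hrhs, loopA_assemble expr.toList 0 [] false [] [] []]
  have hb := cuts_bounds expr.toList 0 ([], false, 0)
  have := assemble_zip (((PySem.List.enumerate expr.toList 0).foldl stepB ([], [], false, 0)).1)
    0 expr.toList le_rfl (fun c hc => by have := hb.1 c hc; omega) hb.2
  simpa [bsBack] using this
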